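-- pv_equiv track=rewrite | github.com/owaismujtaba/EEGAnotator | src/utils.py | correct_eeg_triggers
-- ===== SOURCE A (Python) =====
-- def correct_eeg_triggers(triggers):
--     """
--         Corrects a list of EEG triggers by mapping them to the nearest valid code
--         from a predefined set of correct codes.
--
--         Parameters:
--         triggers (list of int): A list of integer trigger codes to be corrected.
--
--         Returns:
--         list of int: A list of corrected trigger codes, where each input trigger
--                     is either directly mapped if it exists in the correct codings,
--                     or mapped to the nearest valid code if it does not.
--     """
--
--     correct_codings = {
--         255: 255, 224: 224, 192: 192, 160: 160,
--         128: 128, 96: 96, 64: 64, 32: 32, 16: 16, 8: 8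
--     }
--
--     valid_codes = sorted(correct_codings.keys())
--
--     max_trigger = max(valid_codes)
--     nearest_code_map = {}
--
--     for i in range(max_trigger + 1):
--         nearest_code = min(valid_codes, key=lambda x: abs(x - i))
--         nearest_code_map[i] = correct_codings[nearest_code]
--
--     corrected_triggers = []
--     for trigger in triggers:
--         if trigger in nearest_code_map:
--             corrected_triggers.append(nearest_code_map[trigger])
--         else:
--             corrected_triggers.append(nearest_code_map[max_trigger])
--
--     return corrected_triggers
-- ===== SOURCE B (Python) =====
-- def correct_eeg_triggers(triggers):
--     """Same correction, without the 256-entry precomputed table: each in-range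
--     trigger is mapped directly to the nearest valid code by a min-scan."""
--     valid_codes = [8, 16, 32, 64, 96, 128, 160, 192, 224, 255]
--     return [min(valid_codes, key=lambda c: abs(c - t)) if 0 <= t <= 255 else 255
--             for t in triggers]
-- ===== Notes on version B (the rewrite author's own statement) =====
-- stated objective: simpler
-- what changed: B drops A's precomputed 256-entry nearest_code_map (built with a loop over range(256)) and instead maps each in-range trigger directly with min(valid_codes, key=abs distance), out-of-range triggers to 255.
import Mathlib
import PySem

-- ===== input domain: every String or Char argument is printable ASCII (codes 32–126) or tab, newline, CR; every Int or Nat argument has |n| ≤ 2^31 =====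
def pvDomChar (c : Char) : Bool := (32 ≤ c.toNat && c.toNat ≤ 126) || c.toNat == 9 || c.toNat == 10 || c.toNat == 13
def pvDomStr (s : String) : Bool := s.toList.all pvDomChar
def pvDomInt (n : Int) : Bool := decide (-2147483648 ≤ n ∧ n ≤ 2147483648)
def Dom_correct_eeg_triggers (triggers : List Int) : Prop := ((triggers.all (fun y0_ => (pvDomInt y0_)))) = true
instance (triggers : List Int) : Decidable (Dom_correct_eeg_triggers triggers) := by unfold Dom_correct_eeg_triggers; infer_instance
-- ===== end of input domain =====

-- B replaces A's precomputed 256-entry lookup table by a direct per-trigger min-scan over the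
-- ten valid codes (objective: simpler).

-- ===== PORT A =====
def correct_eeg_triggers (triggers : List Int) : List Int :=
  let correct_codings : PySem.Dict Int Int :=
    PySem.Dict.ofList [(255,255),(224,224),(192,192),(160,160),(128,128),(96,96),(64,64),(32,32),(16,16),(8,8)]
  let valid_codes := PySem.List.sorted correct_codings.keys (fun x => x) false
  let max_trigger := match PySem.List.max? valid_codes (fun x => x) with | some m => m | none => 0
  let nearest_code_map :=
    (PySem.List.pyRange 0 (max_trigger + 1) 1).foldl
      (fun d i =>
        let nearest_code :=
          match PySem.List.min? valid_codes (fun x => (x - i).natAbs) with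
          | some m => m
          | none => 0
        d.insert i (correct_codings.getD nearest_code 0))
      PySem.Dict.empty
  triggers.foldl
    (fun acc trigger =>
      if nearest_code_map.contains trigger then acc ++ [nearest_code_map.getD trigger 0]
      else acc ++ [nearest_code_map.getD max_trigger 0])
    []

-- ===== PORT B =====
def pvNearestValid (t : Int) : Int :=
  match PySem.List.min? [8, 16, 32, 64, 96, 128, 160, 192, 224, 255] (fun c => (c - t).natAbs) with
  | some m => m
  | none => 255

def correct_eeg_triggers_alt (triggers : List Int) : List Int :=
  triggers.map (fun t => if 0 ≤ t ∧ t ≤ 255 then pvNearestValid t else 255)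

-- ===== PRECONDITION & SPEC =====
def Spec_correct_eeg_triggers (triggers : List Int) (out : List Int) : Prop := out = correct_eeg_triggers_alt triggers
instance (triggers : List Int) (out : List Int) : Decidable (Spec_correct_eeg_triggers triggers out) := by unfold Spec_correct_eeg_triggers; infer_instance

-- ===== CLAIM (what is proved, stated in full; the proofs are below) =====
def Claim_equal_correct_eeg_triggers : Prop := ∀ (triggers : List Int), Dom_correct_eeg_triggers triggers → Spec_correct_eeg_triggers triggers (correct_eeg_triggers triggers)

-- ===== LEMMAS AND PROOFS =====

-- A's fully-evaluated table computation, as one closed dictionary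
def pvNM : PySem.Dict Int Int :=
  (PySem.List.pyRange 0 256 1).foldl
    (fun d i =>
      d.insert i
        ((PySem.Dict.ofList [((255:Int),(255:Int)),(224,224),(192,192),(160,160),(128,128),(96,96),(64,64),(32,32),(16,16),(8,8)]).getD
          (match PySem.List.min? (PySem.List.sorted (PySem.Dict.ofList [((255:Int),(255:Int)),(224,224),(192,192),(160,160),(128,128),(96,96),(64,64),(32,32),(16,16),(8,8)]).keys (fun x => x) false) (fun x => (x - i).natAbs) with
           | some m => m
           | none => 0) 0))
    PySem.Dict.empty

theorem keys_foldl_insert (l : List Int) (f : Int → Int) (d : PySem.Dict Int Int)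
    (hnd : l.Nodup) (h : ∀ i ∈ l, d.contains i = false) :
    (l.foldl (fun d i => d.insert i (f i)) d).keys = d.keys ++ l := by
  induction l generalizing d with
  | nil => simp
  | cons x xs ih =>
    simp only [List.foldl_cons]
    rw [ih (d.insert x (f x)) hnd.of_cons ?_]
    · rw [PySem.Dict.keys_insert_of_not_contains d (f x) (h x (by simp))]
      simp
    · intro i hi
      rw [PySem.Dict.contains_insert]
      have hne : i ≠ x := by
        rintro rfl; exact (List.nodup_cons.mp hnd).1 hi
      simp [hne, h i (List.mem_cons_of_mem _ hi)]

theorem pvNM_keys : pvNM.keys = PySem.List.pyRange 0 256 1 := by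
  unfold pvNM
  exact (keys_foldl_insert (PySem.List.pyRange 0 256 1)
    (fun i =>
      ((PySem.Dict.ofList [((255:Int),(255:Int)),(224,224),(192,192),(160,160),(128,128),(96,96),(64,64),(32,32),(16,16),(8,8)]).getD
        (match PySem.List.min? (PySem.List.sorted (PySem.Dict.ofList [((255:Int),(255:Int)),(224,224),(192,192),(160,160),(128,128),(96,96),(64,64),(32,32),(16,16),(8,8)]).keys (fun x => x) false) (fun x => (x - i).natAbs) with
         | some m => m
         | none => 0) 0))
    PySem.Dict.empty (PySem.List.nodup_pyRange_one 0 256) (by intro i _; simp)).trans (by simp)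

theorem pvNM_contains (t : Int) : pvNM.contains t = true ↔ (0 ≤ t ∧ t < 256) := by
  rw [PySem.Dict.contains_iff_mem_keys, pvNM_keys, PySem.List.mem_pyRange_one]

set_option maxRecDepth 100000 in
theorem pvNM_getD_fin : ∀ n : Fin 256, pvNM.getD (n : Int) 0 = pvNearestValid (n : Int) := by
  decide

set_option maxRecDepth 100000 in
theorem elem_eq (t : Int) :
    (if pvNM.contains t then pvNM.getD t 0 else pvNM.getD 255 0)
      = (if 0 ≤ t ∧ t ≤ 255 then pvNearestValid t else 255) := by
  by_cases h : 0 ≤ t ∧ t ≤ 255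
  · have hc : pvNM.contains t = true := (pvNM_contains t).mpr ⟨h.1, by omega⟩
    rw [if_pos hc, if_pos h]
    have hn : t = ((⟨t.toNat, by omega⟩ : Fin 256) : Int) := by simp; omega
    rw [hn]; exact pvNM_getD_fin _
  · have hc : pvNM.contains t = false := by
      cases hcc : pvNM.contains t
      · rfl
      · exact absurd ((pvNM_contains t).mp hcc) (by omega)
    rw [if_neg (by simp [hc]), if_neg h]
    decide

theorem A_eq_map (triggers : List Int) :
    correct_eeg_triggers triggers
      = triggers.map (fun t => if pvNM.contains t then pvNM.getD t 0 else pvNM.getD 255 0) := by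
  show triggers.foldl
      (fun acc t => if pvNM.contains t then acc ++ [pvNM.getD t 0] else acc ++ [pvNM.getD 255 0]) []
    = _
  induction triggers using List.reverseRecOn with
  | nil => rfl
  | append_singleton xs x ih =>
    rw [List.foldl_append, List.map_append, ← ih]
    by_cases h : pvNM.contains x = true <;> simp [h]

-- ===== VERDICT (by name: the statement is the Claim_ definition above) =====
theorem correct_eeg_triggers_spec : Claim_equal_correct_eeg_triggers := by
  intro triggers _
  show correct_eeg_triggers triggers = correct_eeg_triggers_alt triggers
  rw [A_eq_map, correct_eeg_triggers_alt]
  exact List.map_congr_left (fun t _ => elem_eq t)
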